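-- pv_equiv track=rewrite | github.com/UOR-Foundation/uor-evolution | modules/natural_language/prime_semantics.py | _is_suitable_encoding
-- ===== SOURCE A (Python) =====
-- def _is_suitable_encoding(n: int) -> bool:
--     """Check if number is suitable for semantic encoding"""
--     if n < 2:
--         return False
--     if n % 2 == 0:
--         return False
--     # Check divisibility by small primes
--     for p in [3, 5, 7, 11, 13]:
--         if n % p == 0 and n != p:
--             return False
--     return True
-- ===== SOURCE B (Python) =====
-- # Factored wheel sieve: two residue tables, mod 30 = 2*3*5 and mod 1001 = 7*11*13,
-- # built once by striking out multiples; per call: two mods + two set lookups.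
-- def _sieve(m, primes):
--     s = set(range(m))
--     for p in primes:
--         s -= set(range(0, m, p))
--     return frozenset(s)
--
-- _S30 = _sieve(30, (2, 3, 5))
-- _S1001 = _sieve(1001, (7, 11, 13))
-- _BASE = frozenset((3, 5, 7, 11, 13))
--
--
-- def _is_suitable_encoding(n: int) -> bool:
--     """Check if number is suitable for semantic encoding"""
--     return n in _BASE or (n > 1 and n % 30 in _S30 and n % 1001 in _S1001)
-- ===== Notes on version B (the rewrite author's own statement) =====
-- stated objective: alternative
-- what changed: Replaces the per-call loop over the small primes by a factored wheel sieve: two residue tables (mod 30 and mod 1001) built once by striking out multiples, so each call is two modulos plus two set lookups (the evenness test is subsumed by the mod-30 wheel); a small base-prime set keeps the five base primes suitable.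
import Mathlib
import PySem

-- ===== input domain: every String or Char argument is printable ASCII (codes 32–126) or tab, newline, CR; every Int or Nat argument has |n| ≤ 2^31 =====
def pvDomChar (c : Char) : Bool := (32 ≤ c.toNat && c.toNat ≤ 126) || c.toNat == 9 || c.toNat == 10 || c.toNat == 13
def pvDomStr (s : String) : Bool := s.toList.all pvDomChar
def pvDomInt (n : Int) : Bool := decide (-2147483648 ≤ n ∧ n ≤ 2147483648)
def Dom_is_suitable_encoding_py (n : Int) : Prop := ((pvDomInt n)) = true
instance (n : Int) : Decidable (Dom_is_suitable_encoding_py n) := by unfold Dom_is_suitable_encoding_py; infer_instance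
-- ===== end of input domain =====

-- B precomputes, by a factored wheel sieve striking out multiples of 2,3,5 (mod 30) and of
-- 7,11,13 (mod 1001), two suitable-residue tables; each call is two mods + two lookups (alternative algorithm).


-- ===== PORT A =====
-- the 'for p in [3, 5, 7, 11, 13]' loop with its early return
def pvLoopA (n : Int) : List Int → Bool
  | [] => true
  | p :: ps => if PySem.Int.mod n p = 0 ∧ n ≠ p then false else pvLoopA n ps

def is_suitable_encoding_py (n : Int) : Bool :=
  if n < 2 then false
  else if PySem.Int.mod n 2 = 0 then false
  else pvLoopA n [3, 5, 7, 11, 13]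

-- ===== PORT B =====
-- _sieve(m, primes): set(range(m)) minus the multiples of each prime
def pvSieve (m : Int) (primes : List Int) : PySem.Set Int :=
  primes.foldl
    (fun s p => PySem.Set.diff s (PySem.Set.ofList (PySem.List.pyRange 0 m p)))
    (PySem.Set.ofList (PySem.List.pyRange 0 m 1))

def pvS30 : PySem.Set Int := pvSieve 30 [2, 3, 5]
def pvS1001 : PySem.Set Int := pvSieve 1001 [7, 11, 13]
def pvBase : PySem.Set Int := PySem.Set.ofList [3, 5, 7, 11, 13]

def is_suitable_encoding_py_alt (n : Int) : Bool :=
  PySem.Set.contains pvBase n ||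
    (decide (1 < n) && PySem.Set.contains pvS30 (PySem.Int.mod n 30) &&
      PySem.Set.contains pvS1001 (PySem.Int.mod n 1001))

-- ===== PRECONDITION & SPEC =====
def Spec_is_suitable_encoding_py (n : Int) (out : Bool) : Prop := out = is_suitable_encoding_py_alt n
instance (n : Int) (out : Bool) : Decidable (Spec_is_suitable_encoding_py n out) := by unfold Spec_is_suitable_encoding_py; infer_instance

-- ===== CLAIM (what is proved, stated in full; the proofs are below) =====
def Claim_equal_is_suitable_encoding_py : Prop := ∀ (n : Int), Dom_is_suitable_encoding_py n → Spec_is_suitable_encoding_py n (is_suitable_encoding_py n)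

-- ===== LEMMAS AND PROOFS =====

-- membership in the fold of set-differences = in the start set and struck out by no step
theorem pv_fold_mem (m r : Int) (ps : List Int) (s : PySem.Set Int) :
    r ∈ ps.foldl (fun s p => PySem.Set.diff s (PySem.Set.ofList (PySem.List.pyRange 0 m p))) s
      ↔ r ∈ s ∧ ∀ p ∈ ps, r ∉ PySem.List.pyRange 0 m p := by
  induction ps generalizing s with
  | nil => simp
  | cons p ps ih =>
      simp only [List.foldl_cons, ih, PySem.Set.mem_diff, PySem.Set.mem_ofList, List.mem_cons]
      constructor
      · rintro ⟨⟨hs, hp⟩, hall⟩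
        exact ⟨hs, fun q hq => hq.elim (fun h => h ▸ hp) (hall q)⟩
      · rintro ⟨hs, hall⟩
        exact ⟨⟨hs, hall p (Or.inl rfl)⟩, fun q hq => hall q (Or.inr hq)⟩

-- membership in the mod-30 table = a residue in [0, 30) divisible by none of 2, 3, 5
theorem pv_mem_s30 (r : Int) :
    r ∈ pvS30 ↔ (0 ≤ r ∧ r < 30) ∧ ¬(2:Int) ∣ r ∧ ¬(3:Int) ∣ r ∧ ¬(5:Int) ∣ r := by
  rw [pvS30, pvSieve, pv_fold_mem]
  simp only [PySem.Set.mem_ofList, PySem.List.mem_pyRange_one, List.mem_cons,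
    List.not_mem_nil, forall_eq_or_imp, IsEmpty.forall_iff,
    PySem.List.mem_pyRange_iff_of_pos (a := 0) (b := 30) (s := 2) (by norm_num),
    PySem.List.mem_pyRange_iff_of_pos (a := 0) (b := 30) (s := 3) (by norm_num),
    PySem.List.mem_pyRange_iff_of_pos (a := 0) (b := 30) (s := 5) (by norm_num),
    sub_zero]
  tauto

-- membership in the mod-1001 table = a residue in [0, 1001) divisible by none of 7, 11, 13
theorem pv_mem_s1001 (r : Int) :
    r ∈ pvS1001 ↔ (0 ≤ r ∧ r < 1001) ∧ ¬(7:Int) ∣ r ∧ ¬(11:Int) ∣ r ∧ ¬(13:Int) ∣ r := by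
  rw [pvS1001, pvSieve, pv_fold_mem]
  simp only [PySem.Set.mem_ofList, PySem.List.mem_pyRange_one, List.mem_cons,
    List.not_mem_nil, forall_eq_or_imp, IsEmpty.forall_iff,
    PySem.List.mem_pyRange_iff_of_pos (a := 0) (b := 1001) (s := 7) (by norm_num),
    PySem.List.mem_pyRange_iff_of_pos (a := 0) (b := 1001) (s := 11) (by norm_num),
    PySem.List.mem_pyRange_iff_of_pos (a := 0) (b := 1001) (s := 13) (by norm_num),
    sub_zero]
  tauto

-- a wheel prime divides n % m iff it divides n, when the prime divides the positive wheel m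
theorem pv_dvd_mod (p n m : Int) (hm : 0 < m) (hp : p ∣ m) :
    p ∣ PySem.Int.mod n m ↔ p ∣ n := by
  rw [PySem.Int.mod_eq_emod_of_pos (a := n) hm,
    ← PySem.Int.emod_eq_zero_iff_dvd, ← PySem.Int.emod_eq_zero_iff_dvd,
    Int.emod_emod_of_dvd n hp]

-- ===== VERDICT (by name: the statement is the Claim_ definition above) =====
theorem is_suitable_encoding_py_spec : Claim_equal_is_suitable_encoding_py := by
  intro n _
  show is_suitable_encoding_py n = is_suitable_encoding_py_alt n
  rw [Bool.eq_iff_iff]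
  have h30a := PySem.Int.mod_nonneg n (b := 30) (by norm_num)
  have h30b := PySem.Int.mod_lt n (b := 30) (by norm_num)
  have h1001a := PySem.Int.mod_nonneg n (b := 1001) (by norm_num)
  have h1001b := PySem.Int.mod_lt n (b := 1001) (by norm_num)
  simp only [is_suitable_encoding_py, is_suitable_encoding_py_alt, pvLoopA, pvBase,
    Bool.or_eq_true, Bool.and_eq_true, decide_eq_true_eq,
    PySem.Set.contains_iff, PySem.Set.mem_ofList, pv_mem_s30, pv_mem_s1001,
    pv_dvd_mod 2 n 30 (by norm_num) (by norm_num),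
    pv_dvd_mod 3 n 30 (by norm_num) (by norm_num),
    pv_dvd_mod 5 n 30 (by norm_num) (by norm_num),
    pv_dvd_mod 7 n 1001 (by norm_num) (by norm_num),
    pv_dvd_mod 11 n 1001 (by norm_num) (by norm_num),
    pv_dvd_mod 13 n 1001 (by norm_num) (by norm_num),
    PySem.Int.mod_eq_zero_iff_dvd, List.mem_cons]
  split_ifs <;> simp_all <;> omega
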